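-- pv_equiv track=rewrite | github.com/Nocotov77/py_gerda | 24_Возврат из глубины функции Отладка/2407_Шестерёнки/main.py | gears
-- ===== SOURCE A (Python) =====
-- def gears(data, n, m):
--     flat = []
--     for box in data:
--         flat.extend(box)
--     freq = {}
--     for gear in flat:
--         if gear <= 0:
--             continue
--         freq[gear] = freq.get(gear, 0) + 1
--     candidates = sorted(freq.keys(), reverse=True)
--     for a in candidates:
--         if a % n:
--             continue
--         k = a // n
--         b = m * k
--         if b in freq:
--             if a == b and freq[a] < 2:
--                 continue
--             return (a, b)
--     return (None, None)
-- ===== SOURCE B (Python) =====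
-- def gears(data, n, m):
--     cnt = {}
--     for box in data:
--         for g in box:
--             if g > 0:
--                 cnt[g] = cnt.get(g, 0) + 1
--     best = max((g for g in cnt
--                 if g % n == 0
--                 and m * (g // n) in cnt
--                 and (g != m * (g // n) or cnt[g] >= 2)),
--                default=None)
--     if best is None:
--         return (None, None)
--     return (best, m * (best // n))
-- ===== Notes on version B (the rewrite author's own statement) =====
-- stated objective: alternative
-- what changed: B builds the positive-gear counter in one nested pass (no intermediate flat list) and picks the answer by a single linear max-with-filter over the counter's keys instead of sorting all keys descending and scanning for the first qualifying one.
import Mathlib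
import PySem

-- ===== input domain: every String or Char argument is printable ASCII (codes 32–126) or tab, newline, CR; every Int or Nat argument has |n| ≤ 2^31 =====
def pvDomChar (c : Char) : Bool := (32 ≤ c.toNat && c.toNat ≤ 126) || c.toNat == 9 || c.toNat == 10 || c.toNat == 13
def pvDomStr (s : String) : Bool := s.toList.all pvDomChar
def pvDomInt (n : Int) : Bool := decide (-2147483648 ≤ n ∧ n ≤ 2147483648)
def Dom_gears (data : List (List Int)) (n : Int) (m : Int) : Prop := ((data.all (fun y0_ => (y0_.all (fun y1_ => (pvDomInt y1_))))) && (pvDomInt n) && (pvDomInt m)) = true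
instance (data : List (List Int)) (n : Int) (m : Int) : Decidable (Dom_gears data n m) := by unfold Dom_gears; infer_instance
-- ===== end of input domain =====

set_option maxRecDepth 4000

-- B replaces A's sort-all-keys-descending-then-scan by one linear max-with-filter pass over the counter's keys (objective: alternative; no sort).

-- ===== PORT A =====
-- the `for a in candidates: … continue/return` loop of A
def gearsFind (freq : PySem.Dict Int Int) (n m : Int) : List Int → Option Int × Option Int
  | [] => (none, none)
  | a :: rest =>
    if PySem.Int.mod a n ≠ 0 then gearsFind freq n m rest
    else
      let k := PySem.Int.floordiv a n
      let b := m * k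
      if freq.contains b then
        -- `freq[a]`: a is always a key of freq here, so getD is exact
        if a = b ∧ freq.getD a 0 < 2 then gearsFind freq n m rest
        else (some a, some b)
      else gearsFind freq n m rest

def gears (data : List (List Int)) (n : Int) (m : Int) : Option Int × Option Int :=
  let flat := data.foldl (fun acc box => acc ++ box) []
  -- freq[gear] = freq.get(gear, 0) + 1  is  Dict.modify gear 0 (· + 1)
  let freq := flat.foldl (fun d g => if g ≤ 0 then d else d.modify g 0 (· + 1))
    (PySem.Dict.empty : PySem.Dict Int Int)
  let candidates := PySem.List.sorted freq.keys (fun x => x) true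
  gearsFind freq n m candidates

-- ===== PORT B =====
def gears_alt (data : List (List Int)) (n : Int) (m : Int) : Option Int × Option Int :=
  let cnt := data.foldl
    (fun d box => box.foldl (fun d g => if g > 0 then d.modify g 0 (· + 1) else d) d)
    (PySem.Dict.empty : PySem.Dict Int Int)
  -- max(generator with the three conditions, default=None) = max? of the filtered key list
  match PySem.List.max?
      (cnt.keys.filter (fun g =>
        PySem.Int.mod g n == 0 &&
        cnt.contains (m * PySem.Int.floordiv g n) &&
        (g != m * PySem.Int.floordiv g n || cnt.getD g 0 ≥ 2)))
      (fun x => x) with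
  | none => (none, none)
  | some best => (some best, some (m * PySem.Int.floordiv best n))

-- ===== PRECONDITION & SPEC =====
-- Pre_ excludes exactly the inputs where Python A raises ZeroDivisionError: n = 0 while some positive gear exists (B raises there too).
def Pre_gears (data : List (List Int)) (n : Int) (m : Int) : Prop :=
  n ≠ 0 ∨ ∀ box ∈ data, ∀ g ∈ box, g ≤ 0
instance (data : List (List Int)) (n : Int) (m : Int) : Decidable (Pre_gears data n m) := by
  unfold Pre_gears; infer_instance

def pvWitness_gears : List (List Int) × Int × Int := ([[2, 4], [6]], 2, 3)

def Spec_gears (data : List (List Int)) (n : Int) (m : Int) (out : Option Int × Option Int) : Prop := out = gears_alt data n m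
instance (data : List (List Int)) (n : Int) (m : Int) (out : Option Int × Option Int) : Decidable (Spec_gears data n m out) := by unfold Spec_gears; infer_instance

-- ===== CLAIM (what is proved, stated in full; the proofs are below) =====
def Claim_equal_gears : Prop := ∀ (data : List (List Int)) (n : Int) (m : Int), Dom_gears data n m → Pre_gears data n m → Spec_gears data n m (gears data n m)

-- ===== LEMMAS AND PROOFS =====

-- the Boolean condition shared by A's loop body and B's filter
def okP (cnt : PySem.Dict Int Int) (n m : Int) (g : Int) : Bool :=
  PySem.Int.mod g n == 0 &&
  cnt.contains (m * PySem.Int.floordiv g n) &&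
  (g != m * PySem.Int.floordiv g n || cnt.getD g 0 ≥ 2)

theorem gearsFind_eq_find? (freq : PySem.Dict Int Int) (n m : Int) (l : List Int) :
    gearsFind freq n m l =
      match l.find? (okP freq n m) with
      | none => (none, none)
      | some a => (some a, some (m * PySem.Int.floordiv a n)) := by
  induction l with
  | nil => rfl
  | cons a rest ih =>
    have hbody : gearsFind freq n m (a :: rest) =
        (if PySem.Int.mod a n ≠ 0 then gearsFind freq n m rest
         else if freq.contains (m * PySem.Int.floordiv a n) then
           if a = m * PySem.Int.floordiv a n ∧ freq.getD a 0 < 2 then gearsFind freq n m rest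
           else (some a, some (m * PySem.Int.floordiv a n))
         else gearsFind freq n m rest) := rfl
    by_cases h1 : PySem.Int.mod a n = 0
    · by_cases h2 : freq.contains (m * PySem.Int.floordiv a n) = true
      · by_cases h3 : a = m * PySem.Int.floordiv a n ∧ freq.getD a 0 < 2
        · have hok : okP freq n m a = false := by
            have h3' : (a != m * PySem.Int.floordiv a n || freq.getD a 0 ≥ 2) = false := by
              rw [Bool.or_eq_false_iff]
              exact ⟨bne_eq_false_iff_eq.mpr h3.1, decide_eq_false (by omega)⟩
            unfold okP
            rw [h3', Bool.and_false]
          rw [hbody, if_neg (not_not_intro h1), if_pos h2, if_pos h3, ih,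
            List.find?_cons_of_neg (by simp [hok])]
        · have hok : okP freq n m a = true := by
            simp only [okP, h1, h2]
            rw [beq_self_eq_true, Bool.true_and, Bool.true_and, Bool.or_eq_true]
            rcases Decidable.not_and_iff_or_not.mp h3 with h | h
            · exact Or.inl (bne_iff_ne.mpr h)
            · exact Or.inr (decide_eq_true (by omega))
          rw [hbody, if_neg (not_not_intro h1), if_pos h2, if_neg h3,
            List.find?_cons_of_pos hok]
      · have hc : freq.contains (m * PySem.Int.floordiv a n) = false :=
          Bool.eq_false_iff.mpr h2
        have hok : okP freq n m a = false := by
          unfold okP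
          rw [hc, Bool.and_false, Bool.false_and]
        rw [hbody, if_neg (not_not_intro h1), if_neg h2, ih,
          List.find?_cons_of_neg (by simp [hok])]
    · have hok : okP freq n m a = false := by
        unfold okP
        rw [beq_eq_false_iff_ne.mpr h1, Bool.false_and, Bool.false_and]
      rw [hbody, if_pos h1, ih, List.find?_cons_of_neg (by simp [hok])]

theorem find?_eq_head?_filter {α : Type} (p : α → Bool) (l : List α) :
    l.find? p = (l.filter p).head? := by
  induction l with
  | nil => rfl
  | cons a t ih =>
    cases h : p a
    · rw [List.find?_cons_of_neg (by simp [h]), List.filter_cons_of_neg (by simp [h]), ih]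
    · rw [List.find?_cons_of_pos h, List.filter_cons_of_pos h]; rfl

-- first match in the descending-sorted keys = maximum of the filtered keys
theorem head?_filter_eq_max?_filter (keys : List Int) (p : Int → Bool) :
    ((PySem.List.sorted keys (fun x => x) true).filter p).head? =
      PySem.List.max? (keys.filter p) (fun x => x) := by
  have hperm : ((PySem.List.sorted keys (fun x => x) true).filter p).Perm (keys.filter p) :=
    (PySem.List.sorted_perm keys (fun x => x) true).filter p
  have hpw : ((PySem.List.sorted keys (fun x => x) true).filter p).Pairwise
      (fun a b => b ≤ a) :=
    List.Pairwise.sublist (List.filter_sublist) (PySem.List.sorted_pairwise_rev keys (fun x => x))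
  cases hl : ((PySem.List.sorted keys (fun x => x) true).filter p) with
  | nil =>
    have h0 : keys.filter p = [] := (hl ▸ hperm).symm.eq_nil
    rw [h0]
    exact (Iff.mpr (PySem.List.max?_eq_none_iff _ _) rfl).symm
  | cons h t =>
    rw [hl] at hperm hpw
    have hne : keys.filter p ≠ [] := by
      intro h0; rw [h0] at hperm; exact absurd hperm.eq_nil (by simp)
    obtain ⟨x, hx⟩ : ∃ x, PySem.List.max? (keys.filter p) (fun x => x) = some x := by
      cases hmx : PySem.List.max? (keys.filter p) (fun x => x) with
      | none => exact absurd (Iff.mp (PySem.List.max?_eq_none_iff _ _) hmx) hne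
      | some x => exact ⟨x, rfl⟩
    have hxmem : x ∈ h :: t := hperm.mem_iff.mpr (PySem.List.max?_mem hx)
    have hxh : x ≤ h := by
      rcases List.mem_cons.mp hxmem with rfl | hxt
      · exact le_refl _
      · exact (List.pairwise_cons.mp hpw).1 x hxt
    have hhx : h ≤ x :=
      PySem.List.max?_isMax hx h (hperm.mem_iff.mp (List.mem_cons_self))
    simp [hx, le_antisymm hxh hhx]

-- B's counter (one nested pass) equals A's counter (over the flattened list)
theorem nested_foldl_eq (data : List (List Int)) :
    data.foldl
      (fun d box => box.foldl (fun d g => if g > 0 then d.modify g 0 (· + 1) else d) d)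
      (PySem.Dict.empty : PySem.Dict Int Int) =
    ((data.foldl (fun acc box => acc ++ box) []).foldl
      (fun d g => if g ≤ 0 then d else d.modify g 0 (· + 1)) (PySem.Dict.empty : PySem.Dict Int Int)) := by
  have hflat : data.foldl (fun acc box => acc ++ box) [] = data.flatten := by
    have : ∀ (acc : List Int), data.foldl (fun acc box => acc ++ box) acc = acc ++ data.flatten := by
      induction data with
      | nil => simp
      | cons b t ih => intro acc; simp [List.foldl, ih, List.flatten]
    simpa using this []
  have hstep : ∀ (l : List Int) (d : PySem.Dict Int Int),
      l.foldl (fun d g => if g > 0 then d.modify g 0 (· + 1) else d) d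
        = l.foldl (fun d g => if g ≤ 0 then d else d.modify g 0 (· + 1)) d := by
    intro l
    induction l with
    | nil => intro d; rfl
    | cons g t ih =>
      intro d
      by_cases h : g ≤ 0
      · simp [List.foldl, if_neg (by omega : ¬ g > 0), if_pos h, ih]
      · simp [List.foldl, if_pos (by omega : g > 0), if_neg h, ih]
  rw [hflat, ← List.foldl_flatten]
  exact hstep data.flatten PySem.Dict.empty

theorem gears_eq_alt (data : List (List Int)) (n m : Int) :
    gears data n m = gears_alt data n m := by
  have hd := nested_foldl_eq data
  show gearsFind
      ((data.foldl (fun acc box => acc ++ box) []).foldl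
        (fun d g => if g ≤ 0 then d else d.modify g 0 (· + 1)) (PySem.Dict.empty : PySem.Dict Int Int)) n m
      (PySem.List.sorted
        ((data.foldl (fun acc box => acc ++ box) []).foldl
          (fun d g => if g ≤ 0 then d else d.modify g 0 (· + 1)) (PySem.Dict.empty : PySem.Dict Int Int)).keys
        (fun x => x) true)
    = match PySem.List.max?
        (((data.foldl
            (fun d box => box.foldl (fun d g => if g > 0 then d.modify g 0 (· + 1) else d) d)
            (PySem.Dict.empty : PySem.Dict Int Int)).keys).filter
          (okP (data.foldl
            (fun d box => box.foldl (fun d g => if g > 0 then d.modify g 0 (· + 1) else d) d)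
            (PySem.Dict.empty : PySem.Dict Int Int)) n m))
        (fun x => x) with
      | none => (none, none)
      | some best => (some best, some (m * PySem.Int.floordiv best n))
  rw [hd, gearsFind_eq_find?, find?_eq_head?_filter, head?_filter_eq_max?_filter]

-- ===== VERDICT (by name: the statement is the Claim_ definition above) =====
theorem gears_spec : Claim_equal_gears := by
  intro data n m _ _
  show gears data n m = gears_alt data n m
  exact gears_eq_alt data n m
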